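-- pv_equiv track=rewrite | github.com/shakthij98/PyRBD3 | pyrbd_plusplus/algorithms/availability/pyrbd.py | most_repeated_node
-- ===== SOURCE A (Python) =====
-- def most_repeated_node(minimal_sets):
--     min_cardinality = min(len(min_set) for min_set in minimal_sets)
--     min_cardinality_sets = [
--         min_set for min_set in minimal_sets if len(min_set) == min_cardinality
--     ]
--
--     nodes_count = {}
--     for min_set in min_cardinality_sets:
--         for node in min_set:
--             if node in nodes_count:
--                 nodes_count[node] += 1
--             else:
--                 nodes_count[node] = 1
--
--     most_repeated_node = max(nodes_count, key=nodes_count.get)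
--     return most_repeated_node
-- ===== SOURCE B (Python) =====
-- def most_repeated_node(minimal_sets):
--     # One pass: bucket node-counts by set cardinality, then pick the smallest bucket.
--     table = {}
--     for min_set in minimal_sets:
--         bucket = table.setdefault(len(min_set), {})
--         for node in min_set:
--             bucket[node] = bucket.get(node, 0) + 1
--     min_cardinality = min(table)
--     bucket = table[min_cardinality]
--     return max(bucket, key=bucket.get)
-- ===== Notes on version B (the rewrite author's own statement) =====
-- stated objective: alternative
-- what changed: B makes a single pass that groups node counts into a cardinality-indexed table of counter dicts, then selects the minimum-cardinality bucket, replacing A's min-scan / filter pass / separate counting pass.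
import Mathlib
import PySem

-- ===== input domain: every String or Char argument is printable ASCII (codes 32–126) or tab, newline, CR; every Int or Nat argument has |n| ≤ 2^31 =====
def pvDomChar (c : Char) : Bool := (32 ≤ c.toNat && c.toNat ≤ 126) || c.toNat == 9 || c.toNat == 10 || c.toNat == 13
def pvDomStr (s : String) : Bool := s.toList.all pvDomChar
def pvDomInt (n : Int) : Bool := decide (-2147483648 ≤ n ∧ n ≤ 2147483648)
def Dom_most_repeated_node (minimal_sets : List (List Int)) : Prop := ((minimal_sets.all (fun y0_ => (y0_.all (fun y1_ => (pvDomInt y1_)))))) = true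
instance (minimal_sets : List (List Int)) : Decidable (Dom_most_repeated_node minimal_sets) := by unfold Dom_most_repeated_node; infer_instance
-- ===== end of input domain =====

-- B builds a cardinality-indexed table of counters in one pass and picks the smallest bucket,
-- instead of A's min-scan, filter pass and separate counting pass (objective: alternative).


-- ===== PORT A =====
-- port of Python's `max(d, key=d.get)` over a count dict: first key with the strictly maximal
-- count (both Pythons contain this exact expression, so both ports use this helper);
-- returns 0 on an empty dict, where Python raises ValueError (excluded by Pre_)
def pyArgmax (d : PySem.Dict Int Int) : Int :=
  match d.keys with
  | [] => 0
  | k :: ks =>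
    (ks.foldl (fun (best : Int × Int) k' =>
        if d.getD k' 0 > best.2 then (k', d.getD k' 0) else best) (k, d.getD k 0)).1

def most_repeated_node (minimal_sets : List (List Int)) : Int :=
  match minimal_sets with
  | [] => 0  -- Python's min() raises ValueError on an empty sequence (excluded by Pre_)
  | m :: ms =>
    let min_cardinality : Int := (ms.map (fun s => (s.length : Int))).foldl min (m.length : Int)
    let min_cardinality_sets := (m :: ms).filter (fun s => (s.length : Int) == min_cardinality)
    let nodes_count : PySem.Dict Int Int :=
      min_cardinality_sets.foldl (fun d min_set =>
        min_set.foldl (fun d n =>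
          if d.contains n then d.insert n (d.getD n 0 + 1) else d.insert n 1) d)
        PySem.Dict.empty
    pyArgmax nodes_count

-- ===== PORT B =====
-- `for node in min_set: bucket[node] = bucket.get(node, 0) + 1`
def pvBump (b : PySem.Dict Int Int) (s : List Int) : PySem.Dict Int Int :=
  s.foldl (fun b n => b.insert n (b.getD n 0 + 1)) b

-- the one-pass table: cardinality ↦ counter dict (setdefault + in-place mutation = read, bump, write back)
def pvTable (minimal_sets : List (List Int)) : PySem.Dict Int (PySem.Dict Int Int) :=
  minimal_sets.foldl (fun t s =>
    t.insert (s.length : Int) (pvBump (t.getD (s.length : Int) PySem.Dict.empty) s))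
    PySem.Dict.empty

def most_repeated_node_alt (minimal_sets : List (List Int)) : Int :=
  match (pvTable minimal_sets).keys with
  | [] => 0  -- Python's min() raises ValueError on an empty dict (excluded by Pre_)
  | k :: ks =>
    pyArgmax ((pvTable minimal_sets).getD (ks.foldl min k) PySem.Dict.empty)

-- ===== PRECONDITION & SPEC =====
-- Pre_ excludes exactly the inputs on which the Python A raises ValueError: the empty list
-- (min of an empty sequence) and lists containing an empty set (the min-cardinality bucket is
-- then empty and max over an empty dict raises).  B raises on the same inputs.
def Pre_most_repeated_node (minimal_sets : List (List Int)) : Prop :=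
  minimal_sets ≠ [] ∧ [] ∉ minimal_sets
instance (minimal_sets : List (List Int)) : Decidable (Pre_most_repeated_node minimal_sets) := by
  unfold Pre_most_repeated_node; infer_instance

def pvWitness_most_repeated_node : List (List Int) := [[1, 2], [2, 3], [1, 2, 3]]

def Spec_most_repeated_node (minimal_sets : List (List Int)) (out : Int) : Prop :=
  out = most_repeated_node_alt minimal_sets
instance (minimal_sets : List (List Int)) (out : Int) : Decidable (Spec_most_repeated_node minimal_sets out) := by
  unfold Spec_most_repeated_node; infer_instance

-- ===== CLAIM (what is proved, stated in full; the proofs are below) =====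
def Claim_equal_most_repeated_node : Prop := ∀ (minimal_sets : List (List Int)), Dom_most_repeated_node minimal_sets → Pre_most_repeated_node minimal_sets → Spec_most_repeated_node minimal_sets (most_repeated_node minimal_sets)

-- ===== LEMMAS AND PROOFS =====

-- a left fold of `min` lands in the fold's inputs …
theorem pv_foldl_min_mem (l : List Int) : ∀ a : Int, l.foldl min a ∈ a :: l := by
  induction l with
  | nil => intro a; simp
  | cons x xs ih =>
    intro a
    simp only [List.foldl]
    rcases List.mem_cons.mp (ih (min a x)) with h | h
    · rw [h]
      rcases le_total a x with hle | hle
      · simp [min_eq_left hle]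
      · simp [min_eq_right hle]
    · simp [h]

-- … and is a lower bound of them
theorem pv_foldl_min_le (l : List Int) : ∀ a : Int, ∀ x ∈ a :: l, l.foldl min a ≤ x := by
  induction l with
  | nil => intro a x hx; simp at hx; simp [hx]
  | cons y ys ih =>
    intro a x hx
    simp only [List.foldl]
    rcases List.mem_cons.mp hx with h | hx'
    · rw [h]
      exact le_trans (ih (min a y) _ (by simp)) (min_le_left a y)
    · rcases List.mem_cons.mp hx' with h | hx''
      · rw [h]
        exact le_trans (ih (min a y) _ (by simp)) (min_le_right a y)
      · exact ih (min a y) x (List.mem_cons.mpr (Or.inr hx''))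

-- two min-folds over lists with the same elements agree
theorem pv_foldl_min_eq_of_mem_iff (a b : Int) (l m : List Int)
    (h : ∀ x, x ∈ a :: l ↔ x ∈ b :: m) : l.foldl min a = m.foldl min b := by
  apply le_antisymm
  · exact pv_foldl_min_le l a _ ((h _).mpr (pv_foldl_min_mem m b))
  · exact pv_foldl_min_le m b _ ((h _).mp (pv_foldl_min_mem l a))

-- the table's bucket at k is the counter built over exactly the sets of cardinality k, in order
theorem pv_table_bucket (k : Int) (l : List (List Int)) :
    ∀ t : PySem.Dict Int (PySem.Dict Int Int),
      ((l.foldl (fun t s =>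
          t.insert (s.length : Int) (pvBump (t.getD (s.length : Int) PySem.Dict.empty) s)) t).getD k PySem.Dict.empty)
      = (l.filter (fun s => (s.length : Int) == k)).foldl pvBump (t.getD k PySem.Dict.empty) := by
  induction l with
  | nil => intro t; simp
  | cons s rest ih =>
    intro t
    by_cases hk : (s.length : Int) = k
    · simp only [List.foldl, List.filter, hk, beq_self_eq_true]
      rw [ih, PySem.Dict.getD_insert_self]
    · have hne : ((s.length : Int) == k) = false := by simp [hk]
      simp only [List.foldl, List.filter, hne]
      rw [ih, PySem.Dict.getD_insert_of_ne _ _ _ (Ne.symm hk)]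

-- the same, phrased on pvTable
theorem pv_table_bucket' (k : Int) (l : List (List Int)) :
    (pvTable l).getD k PySem.Dict.empty
      = (l.filter (fun s => (s.length : Int) == k)).foldl pvBump PySem.Dict.empty := by
  unfold pvTable
  rw [pv_table_bucket]
  simp

-- A's branching count step is the unconditional bump step
theorem pv_countA_eq_bump (l : List (List Int)) (d : PySem.Dict Int Int) :
    l.foldl (fun d ms =>
      ms.foldl (fun d n =>
        if d.contains n then d.insert n (d.getD n 0 + 1) else d.insert n 1) d) d
    = l.foldl pvBump d := by
  have hstep : (fun (d : PySem.Dict Int Int) (n : Int) =>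
      if d.contains n then d.insert n (d.getD n 0 + 1) else d.insert n 1)
      = fun d n => d.insert n (d.getD n 0 + 1) := by
    funext d n
    by_cases h : d.contains n
    · simp [h]
    · have h0 : d.getD n 0 = 0 :=
        PySem.Dict.getD_of_not_contains _ _ (by simpa using h)
      simp [h, h0]
  rw [hstep]; rfl

-- the table's keys are the distinct cardinalities in order of first appearance
theorem pv_table_keys (l : List (List Int)) :
    (pvTable l).keys = PySem.Set.ofList (l.map (fun s => (s.length : Int))) := by
  unfold pvTable
  rw [PySem.Dict.keys_foldl_insert_key]
  simp [PySem.Set.update_nil_left]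

-- ===== VERDICT (by name: the statement is the Claim_ definition above) =====
theorem most_repeated_node_spec : Claim_equal_most_repeated_node := by
  intro minimal_sets _ hpre
  unfold Spec_most_repeated_node
  obtain ⟨hne, _⟩ := hpre
  obtain ⟨s₀, rest, rfl⟩ := List.exists_cons_of_ne_nil hne
  have hkeys : (pvTable (s₀ :: rest)).keys
      = PySem.Set.ofList ((s₀.length : Int) :: rest.map (fun s => (s.length : Int))) := by
    rw [pv_table_keys]; simp
  rcases hk : (pvTable (s₀ :: rest)).keys with _ | ⟨k, ks⟩
  · exfalso
    have hm : ((s₀.length : Int)) ∈ (pvTable (s₀ :: rest)).keys := by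
      rw [hkeys, PySem.Set.mem_ofList]; simp
    rw [hk] at hm; simp at hm
  · have hmem : ∀ x, x ∈ k :: ks ↔
        x ∈ (s₀.length : Int) :: rest.map (fun s => (s.length : Int)) := by
      intro x
      rw [← hk, hkeys, PySem.Set.mem_ofList]
    have hmin : ks.foldl min k
        = (rest.map (fun s => (s.length : Int))).foldl min (s₀.length : Int) :=
      pv_foldl_min_eq_of_mem_iff _ _ _ _ hmem
    unfold most_repeated_node most_repeated_node_alt
    rw [hk]
    simp only [hmin]
    rw [pv_countA_eq_bump, pv_table_bucket']
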